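-- pv_equiv track=rewrite | github.com/dyvenia/viadot | viadot/sources/sharepoint.py | operators_mapping
-- ===== SOURCE A (Python) =====
-- from copy import deepcopy
--
-- def operators_mapping(
--
--     filters: dict,
-- ) -> dict:
--     """
--     Function for mapping comparison and conjunction(logical) operators of filters to the format which is recognized by Microsoft API.
--     Allowed operators:
--         <
--         >
--         <=
--         >=
--         ==
--         !=
--         "&"
--         "|"
--
--     Args:
--         filters (dict): A dictionary which contains operators.
--
--     Raises:
--         ValueError: If operator1 not allowed.
--         ValueError: If operator2 not allowed.
--         ValueError: If operators conjunction not allowed.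
--         ValueError: If filters conjunction not allowed.
--
--     Returns:
--         dict: New modified dict with mapped operators.
--     """
--
--     filters_dict = deepcopy(filters)
--     operators = {
--         "<": "lt",
--         ">": "gt",
--         "<=": "le",
--         ">=": "ge",
--         "==": "eq",
--         "!=": "ne",
--     }
--     logical_op = {"&": "and", "|": "or"}
--
--     for parameters in filters_dict.values():
--         if parameters.get("operator1"):
--             operator1_to_change = parameters.get("operator1")
--             if operator1_to_change in operators.keys():
--                 parameters["operator1"] = operators[operator1_to_change]
--             else:
--                 raise ValueError(
--                     f"This comparison operator: {operator1_to_change} is not allowed. Please read the function documentation for details!"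
--                 )
--         if parameters.get("operator2"):
--             operator2_to_change = parameters.get("operator2")
--             if operator2_to_change in operators.keys():
--                 parameters["operator2"] = operators[operator2_to_change]
--             else:
--                 raise ValueError(
--                     f"This comparison operator: {operator2_to_change} is not allowed. Please read the function documentation for details!"
--                 )
--         if parameters.get("operators_conjunction"):
--             logical_op_to_change = parameters.get("operators_conjunction")
--             if logical_op_to_change in logical_op.keys():
--                 parameters["operators_conjunction"] = logical_op[
--                     logical_op_to_change
--                 ]
--             else:
--                 raise ValueError(
--                     f"This conjunction (logical) operator: {logical_op_to_change} is not allowed. Please read the function documentation for details!"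
--                 )
--         if parameters.get("filters_conjunction"):
--             logical_fl_to_change = parameters.get("filters_conjunction")
--             if logical_fl_to_change in logical_op.keys():
--                 parameters["filters_conjunction"] = logical_op[logical_fl_to_change]
--             else:
--                 raise ValueError(
--                     f"This filters conjunction (logical) operator: {logical_fl_to_change} is not allowed. Please read the function documentation for details!"
--                 )
--
--     return filters_dict
-- ===== SOURCE B (Python) =====
-- def operators_mapping(filters: dict) -> dict:
--     operators = {
--         "<": "lt",
--         ">": "gt",
--         "<=": "le",
--         ">=": "ge",
--         "==": "eq",
--         "!=": "ne",
--     }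
--     logical_op = {"&": "and", "|": "or"}
--     field_maps = {
--         "operator1": (operators, "This comparison operator: {} is not allowed. Please read the function documentation for details!"),
--         "operator2": (operators, "This comparison operator: {} is not allowed. Please read the function documentation for details!"),
--         "operators_conjunction": (logical_op, "This conjunction (logical) operator: {} is not allowed. Please read the function documentation for details!"),
--         "filters_conjunction": (logical_op, "This filters conjunction (logical) operator: {} is not allowed. Please read the function documentation for details!"),
--     }
--
--     def convert(key, value):
--         spec = field_maps.get(key)
--         if spec is None or not value:
--             return value
--         mapping, message = spec
--         if value in mapping:
--             return mapping[value]
--         raise ValueError(message.format(value))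
--
--     return {
--         name: {key: convert(key, value) for key, value in parameters.items()}
--         for name, parameters in filters.items()
--     }
-- ===== Notes on version B (the rewrite author's own statement) =====
-- stated objective: simpler
-- what changed: B replaces A's deepcopy-then-mutate with four duplicated get/check/assign blocks by a pure dict comprehension that rebuilds each inner dict in one pass, converting each value through a field-spec table (key -> (mapping, error message)). Pre_ additionally excludes Lean association lists with duplicate inner keys, which no Python dict input can represent.
import Mathlib
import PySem

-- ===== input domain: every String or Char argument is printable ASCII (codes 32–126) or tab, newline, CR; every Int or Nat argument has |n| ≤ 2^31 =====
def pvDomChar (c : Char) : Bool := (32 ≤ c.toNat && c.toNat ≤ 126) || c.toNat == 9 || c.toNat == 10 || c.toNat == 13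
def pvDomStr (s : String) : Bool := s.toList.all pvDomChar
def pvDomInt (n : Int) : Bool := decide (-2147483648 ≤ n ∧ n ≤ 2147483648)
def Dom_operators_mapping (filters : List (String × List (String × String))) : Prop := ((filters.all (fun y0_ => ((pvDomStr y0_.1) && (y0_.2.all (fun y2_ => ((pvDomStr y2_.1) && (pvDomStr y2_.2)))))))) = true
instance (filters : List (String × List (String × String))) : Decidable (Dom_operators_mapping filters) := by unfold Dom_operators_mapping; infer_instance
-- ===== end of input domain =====

-- B rebuilds the result with one pass over each parameter dict's items (a pure dict
-- comprehension keyed by a field-spec table) instead of A's deepcopy plus four duplicated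
-- get/mutate blocks; objective: simpler. Return-value equivalence only (A mutates a deep copy).


-- ===== PORT A =====
-- the comparison-operator dict `operators`
def pvOperatorsA : PySem.Dict String String :=
  PySem.Dict.mk [("<", "lt"), (">", "gt"), ("<=", "le"), (">=", "ge"), ("==", "eq"), ("!=", "ne")]

-- the logical-operator dict `logical_op`
def pvLogicalA : PySem.Dict String String :=
  PySem.Dict.mk [("&", "and"), ("|", "or")]

-- one `if parameters.get(key): … parameters[key] = mapping[key_value] else raise` block of A.
-- Where the Python raises ValueError the port leaves the dict unchanged (those inputs are
-- outside Pre_operators_mapping).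
def pvStepA (key : String) (m : PySem.Dict String String) (d : PySem.Dict String String) :
    PySem.Dict String String :=
  match d.get? key with
  | none => d
  | some v =>
    if v = "" then d                      -- falsy: the `if parameters.get(key)` guard fails
    else if m.contains v then d.insert key (m.getD v "")
    else d                                -- Python: raise ValueError (excluded by Pre_)

-- loop body: the four blocks in A's order, on one `parameters` dict
def pvBodyA (ps : List (String × String)) : List (String × String) :=
  (pvStepA "filters_conjunction" pvLogicalA
    (pvStepA "operators_conjunction" pvLogicalA
      (pvStepA "operator2" pvOperatorsA
        (pvStepA "operator1" pvOperatorsA (PySem.Dict.mk ps))))).items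

def operators_mapping (filters : List (String × List (String × String))) :
    List (String × List (String × String)) :=
  filters.map (fun e => (e.1, pvBodyA e.2))

-- ===== PORT B =====
-- Source B's `field_maps` table: key ↦ (mapping, message); messages only matter on raising
-- inputs, which are outside Pre_, so the port keeps just the mapping
def pvFieldMapsB : PySem.Dict String (PySem.Dict String String) :=
  PySem.Dict.mk
    [("operator1", PySem.Dict.mk [("<", "lt"), (">", "gt"), ("<=", "le"), (">=", "ge"), ("==", "eq"), ("!=", "ne")]),
     ("operator2", PySem.Dict.mk [("<", "lt"), (">", "gt"), ("<=", "le"), (">=", "ge"), ("==", "eq"), ("!=", "ne")]),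
     ("operators_conjunction", PySem.Dict.mk [("&", "and"), ("|", "or")]),
     ("filters_conjunction", PySem.Dict.mk [("&", "and"), ("|", "or")])]

-- Source B's `convert`; on the raising branch (value truthy, not in mapping) the port returns
-- the value unchanged (outside Pre_)
def pvConvertB (key value : String) : String :=
  match pvFieldMapsB.get? key with
  | none => value
  | some mapping =>
    if value = "" then value
    else match mapping.get? value with
         | some w => w
         | none => value                  -- Python: raise ValueError (excluded by Pre_)

def operators_mapping_alt (filters : List (String × List (String × String))) :
    List (String × List (String × String)) :=
  filters.map (fun e => (e.1, e.2.map (fun kv => (kv.1, pvConvertB kv.1 kv.2))))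

-- ===== PRECONDITION & SPEC =====
-- a value for one of the four operator fields is admissible iff it is falsy ("") or in its map
def pvOkKV (kv : String × String) : Bool :=
  if kv.1 = "operator1" ∨ kv.1 = "operator2" then
    kv.2 = "" || pvOperatorsA.contains kv.2
  else if kv.1 = "operators_conjunction" ∨ kv.1 = "filters_conjunction" then
    kv.2 = "" || pvLogicalA.contains kv.2
  else true

-- Pre_ excludes (a) inputs where A raises ValueError (an operator field holding a non-empty
-- string outside its mapping) and (b) association lists with duplicate inner keys, which no
-- Python dict can represent (the dict collapses them, so A's value there is an artefact of
-- the list encoding).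
def Pre_operators_mapping (filters : List (String × List (String × String))) : Prop :=
  ∀ e ∈ filters, (e.2.map Prod.fst).Nodup ∧ ∀ kv ∈ e.2, pvOkKV kv = true

instance (filters : List (String × List (String × String))) :
    Decidable (Pre_operators_mapping filters) := by unfold Pre_operators_mapping; infer_instance

def pvWitness_operators_mapping : (List (String × List (String × String))) :=
  [("date", [("operator1", ">="), ("operator2", "<"), ("operators_conjunction", "&"), ("value1", "2020")]),
   ("name", [("operator1", "=="), ("filters_conjunction", "|")])]

def Spec_operators_mapping (filters : List (String × List (String × String)))
    (out : List (String × List (String × String))) : Prop := out = operators_mapping_alt filters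
instance (filters : List (String × List (String × String))) (out : List (String × List (String × String))) : Decidable (Spec_operators_mapping filters out) := by unfold Spec_operators_mapping; infer_instance

-- ===== CLAIM (what is proved, stated in full; the proofs are below) =====
def Claim_equal_operators_mapping : Prop := ∀ (filters : List (String × List (String × String))), Dom_operators_mapping filters → Pre_operators_mapping filters → Spec_operators_mapping filters (operators_mapping filters)

-- ===== LEMMAS AND PROOFS =====

-- on lists of pairs with distinct first components, a key determines its value
theorem pvNodupVal {α β : Type} [DecidableEq α] {ps : List (α × β)}
    (h : (ps.map Prod.fst).Nodup) {k : α} {a b : β}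
    (ha : (k, a) ∈ ps) (hb : (k, b) ∈ ps) : a = b := by
  induction ps with
  | nil => cases ha
  | cons p t ih =>
    simp only [List.map_cons, List.nodup_cons] at h
    rcases List.mem_cons.mp ha with ha' | ha'
    · rcases List.mem_cons.mp hb with hb' | hb'
      · exact congrArg Prod.snd (ha'.trans hb'.symm)
      · subst ha'
        exact absurd (List.mem_map_of_mem (f := Prod.fst) hb') (by simpa using h.1)
    · rcases List.mem_cons.mp hb with hb' | hb'
      · subst hb'
        exact absurd (List.mem_map_of_mem (f := Prod.fst) ha') (by simpa using h.1)
      · exact ih h.2 ha' hb'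

-- value transformation performed by one A-block at its key
def pvTrA (m : PySem.Dict String String) (v : String) : String :=
  if v = "" then v else if m.contains v then m.getD v "" else v

-- one A-block rewrites the items pointwise at its key (needs distinct keys)
theorem pvStepA_items (key : String) (m : PySem.Dict String String)
    (d : PySem.Dict String String) (hnd : (d.items.map Prod.fst).Nodup) :
    (pvStepA key m d).items =
      d.items.map (fun p => if p.1 = key then (p.1, pvTrA m p.2) else p) := by
  have huniq : ∀ v, d.get? key = some v → ∀ p ∈ d.items, p.1 = key → p.2 = v := by
    intro v hg p hp hpk
    obtain ⟨pk, pv⟩ := p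
    cases hpk
    exact pvNodupVal hnd hp (PySem.Dict.mem_items_of_get?_eq_some d hg)
  unfold pvStepA
  cases hg : d.get? key with
  | none =>
    have hk : key ∉ d.items.map Prod.fst := by
      have := (PySem.Dict.get?_eq_none_iff_not_mem_keys (d := d) (k := key)).mp hg
      simpa [PySem.Dict.keys] using this
    refine Eq.symm ((List.map_congr_left (fun p hp => ?_)).trans (List.map_id _))
    have : p.1 ≠ key := fun hpk => hk (hpk ▸ List.mem_map_of_mem (f := Prod.fst) hp)
    simp [this]
  | some v =>
    by_cases hv : v = ""
    · simp only [hv]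
      refine Eq.symm ((List.map_congr_left (fun p hp => ?_)).trans (List.map_id _))
      by_cases hpk : p.1 = key
      · have h2 := huniq v hg p hp hpk
        obtain ⟨pk, pv⟩ := p
        simp only [] at h2 hpk
        simp [hpk, h2, pvTrA, hv]
      · simp [hpk]
    · by_cases hc : m.contains v = true
      · simp only [if_neg hv, if_pos hc]
        have hcont : d.contains key = true := by
          rw [PySem.Dict.contains_eq_isSome_get?, hg]; rfl
        rw [PySem.Dict.items_insert_of_contains _ _ hcont]
        refine List.map_congr_left (fun p hp => ?_)
        by_cases hpk : p.1 = key
        · have h2 := huniq v hg p hp hpk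
          obtain ⟨pk, pv⟩ := p
          simp only [] at h2 hpk
          simp [hpk, h2, pvTrA, hv, hc]
        · obtain ⟨pk, pv⟩ := p
          simp only [] at hpk
          simp [hpk]
      · simp only [if_neg hv, if_neg hc]
        refine Eq.symm ((List.map_congr_left (fun p hp => ?_)).trans (List.map_id _))
        by_cases hpk : p.1 = key
        · have h2 := huniq v hg p hp hpk
          obtain ⟨pk, pv⟩ := p
          simp only [] at h2 hpk
          simp [hpk, h2, pvTrA, hv, hc]
        · simp [hpk]

-- one A-block keeps the key sequence (hence Nodup of keys) unchanged
theorem pvStepA_keys (key : String) (m : PySem.Dict String String)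
    (d : PySem.Dict String String) (hnd : (d.items.map Prod.fst).Nodup) :
    (pvStepA key m d).items.map Prod.fst = d.items.map Prod.fst := by
  rw [pvStepA_items key m d hnd, List.map_map]
  refine List.map_congr_left (fun p hp => ?_)
  by_cases hpk : p.1 = key <;> simp [hpk]

-- B's convert, specialised to each of the four keys (plain reduction of the table lookup)
theorem pvConvertB_eval_op (k : String) (hk : k = "operator1" ∨ k = "operator2") (v : String) :
    pvConvertB k v =
      if v = "" then v else match pvOperatorsA.get? v with | some w => w | none => v := by
  rcases hk with h | h <;> subst h <;> rfl

theorem pvConvertB_eval_log (k : String)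
    (hk : k = "operators_conjunction" ∨ k = "filters_conjunction") (v : String) :
    pvConvertB k v =
      if v = "" then v else match pvLogicalA.get? v with | some w => w | none => v := by
  rcases hk with h | h <;> subst h <;> rfl

theorem pvConvertB_eval_other (k : String)
    (h1 : k ≠ "operator1") (h2 : k ≠ "operator2")
    (h3 : k ≠ "operators_conjunction") (h4 : k ≠ "filters_conjunction") (v : String) :
    pvConvertB k v = v := by
  have hget : pvFieldMapsB.get? k = none := by
    simp [pvFieldMapsB, PySem.Dict.get?, Ne.symm h1, Ne.symm h2, Ne.symm h3, Ne.symm h4]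
  simp [pvConvertB, hget]

-- on an admissible value, A's transformation at a map equals B's convert result
theorem pvTrA_eq_lookup (m : PySem.Dict String String) (v : String)
    (hok : v = "" ∨ m.contains v = true) :
    pvTrA m v = if v = "" then v else match m.get? v with | some w => w | none => v := by
  by_cases hv : v = ""
  · simp [pvTrA, hv]
  · have hc : m.contains v = true := hok.resolve_left hv
    have hc' := hc
    rw [PySem.Dict.contains_eq_isSome_get?] at hc'
    rcases Option.isSome_iff_exists.mp hc' with ⟨w, hw⟩
    simp [pvTrA, hv, hc, hw, PySem.Dict.getD_eq_get?_getD]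

-- the four A-blocks composed pointwise equal B's convert on an admissible pair
theorem pvCompose_eq_convert (kv : String × String) (hok : pvOkKV kv = true) :
    (fun p => if p.1 = "filters_conjunction" then (p.1, pvTrA pvLogicalA p.2) else p)
      ((fun p => if p.1 = "operators_conjunction" then (p.1, pvTrA pvLogicalA p.2) else p)
        ((fun p => if p.1 = "operator2" then (p.1, pvTrA pvOperatorsA p.2) else p)
          ((fun p => if p.1 = "operator1" then (p.1, pvTrA pvOperatorsA p.2) else p) kv)))
      = (kv.1, pvConvertB kv.1 kv.2) := by
  obtain ⟨k, v⟩ := kv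
  by_cases h1 : k = "operator1"
  · subst h1
    have hok' : v = "" ∨ pvOperatorsA.contains v = true := by
      simpa [pvOkKV] using hok
    have he : pvTrA pvOperatorsA v = pvConvertB "operator1" v := by
      rw [pvConvertB_eval_op _ (Or.inl rfl)]; exact pvTrA_eq_lookup _ _ hok'
    simp [he]
  · by_cases h2 : k = "operator2"
    · subst h2
      have hok' : v = "" ∨ pvOperatorsA.contains v = true := by
        simpa [pvOkKV] using hok
      have he : pvTrA pvOperatorsA v = pvConvertB "operator2" v := by
        rw [pvConvertB_eval_op _ (Or.inr rfl)]; exact pvTrA_eq_lookup _ _ hok'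
      simp [he]
    · by_cases h3 : k = "operators_conjunction"
      · subst h3
        have hok' : v = "" ∨ pvLogicalA.contains v = true := by
          simpa [pvOkKV] using hok
        have he : pvTrA pvLogicalA v = pvConvertB "operators_conjunction" v := by
          rw [pvConvertB_eval_log _ (Or.inl rfl)]; exact pvTrA_eq_lookup _ _ hok'
        simp [he]
      · by_cases h4 : k = "filters_conjunction"
        · subst h4
          have hok' : v = "" ∨ pvLogicalA.contains v = true := by
            simpa [pvOkKV] using hok
          have he : pvTrA pvLogicalA v = pvConvertB "filters_conjunction" v := by
            rw [pvConvertB_eval_log _ (Or.inr rfl)]; exact pvTrA_eq_lookup _ _ hok'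
          simp [he]
        · simp only [if_neg h1, if_neg h2, if_neg h3, if_neg h4]
          rw [pvConvertB_eval_other k h1 h2 h3 h4]

-- one filters entry: A's loop body equals B's rebuilt item list
theorem pvBodyA_eq (ps : List (String × String))
    (hnd : (ps.map Prod.fst).Nodup) (hok : ∀ kv ∈ ps, pvOkKV kv = true) :
    pvBodyA ps = ps.map (fun kv => (kv.1, pvConvertB kv.1 kv.2)) := by
  unfold pvBodyA
  have h0 : ((PySem.Dict.mk ps).items.map Prod.fst).Nodup := hnd
  have h1 := pvStepA_items "operator1" pvOperatorsA (PySem.Dict.mk ps) h0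
  have k1 := pvStepA_keys "operator1" pvOperatorsA (PySem.Dict.mk ps) h0
  have h0b : (((pvStepA "operator1" pvOperatorsA (PySem.Dict.mk ps)).items.map Prod.fst)).Nodup := by
    rw [k1]; exact h0
  have h2 := pvStepA_items "operator2" pvOperatorsA _ h0b
  have k2 := pvStepA_keys "operator2" pvOperatorsA _ h0b
  have h0c : (((pvStepA "operator2" pvOperatorsA
      (pvStepA "operator1" pvOperatorsA (PySem.Dict.mk ps))).items.map Prod.fst)).Nodup := by
    rw [k2, k1]; exact h0
  have h3 := pvStepA_items "operators_conjunction" pvLogicalA _ h0c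
  have k3 := pvStepA_keys "operators_conjunction" pvLogicalA _ h0c
  have h0d : (((pvStepA "operators_conjunction" pvLogicalA (pvStepA "operator2" pvOperatorsA
      (pvStepA "operator1" pvOperatorsA (PySem.Dict.mk ps)))).items.map Prod.fst)).Nodup := by
    rw [k3, k2, k1]; exact h0
  have h4 := pvStepA_items "filters_conjunction" pvLogicalA _ h0d
  rw [h4, h3, h2, h1, List.map_map, List.map_map, List.map_map]
  exact List.map_congr_left (fun kv hkv => pvCompose_eq_convert kv (hok kv hkv))

-- ===== VERDICT (by name: the statement is the Claim_ definition above) =====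
theorem operators_mapping_spec : Claim_equal_operators_mapping := by
  intro filters _ hpre
  unfold Spec_operators_mapping operators_mapping operators_mapping_alt
  refine List.map_congr_left (fun e he => ?_)
  obtain ⟨hnd, hok⟩ := hpre e he
  rw [pvBodyA_eq e.2 hnd hok]
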